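-- pv_equiv track=rewrite | github.com/eaverdeja/codecrafters-grep-python | app/matcher.py | _find_matching_parentheses
-- ===== SOURCE A (Python) =====
-- def _find_matching_parentheses(text: str) -> list[tuple[int, int]]:
--     stack = []
--     matches = []
--     for i, char in enumerate(text):
--         if char == "(":
--             stack.append(i)
--         elif char == ")":
--             opening_index = stack.pop()
--             matches.append((opening_index, i))
--
--     matches.sort(key=lambda x: x[0])
--     return matches
-- ===== SOURCE B (Python) =====
-- def _find_matching_parentheses(text: str) -> list[tuple[int, int]]:
--     # Tree/frame accumulation: each open paren gets a frame collecting the pairs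
--     # completed inside it; a completed pair is prepended to its own children and
--     # the whole block is merged into the enclosing frame (or the top-level list),
--     # so the result comes out already ordered by opening index -- no final sort.
--     base = []
--     stack = []  # (open_index, list of pairs completed inside this frame)
--     for i, char in enumerate(text):
--         if char == "(":
--             stack.append((i, []))
--         elif char == ")":
--             o, kids = stack.pop()
--             block = [(o, i)] + kids
--             if stack:
--                 stack[-1][1].extend(block)
--             else:
--                 base.extend(block)
--     for _, kids in stack:
--         base.extend(kids)
--     return base
-- ===== Notes on version B (the rewrite author's own statement) =====
-- stated objective: alternative
-- what changed: B drops A's final sort and its flat matches list: it keeps, per open stack frame, the list of pairs completed inside that frame, merges a completed pair with its children into the enclosing frame, and thus emits the result already ordered by opening index.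
import Mathlib
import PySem

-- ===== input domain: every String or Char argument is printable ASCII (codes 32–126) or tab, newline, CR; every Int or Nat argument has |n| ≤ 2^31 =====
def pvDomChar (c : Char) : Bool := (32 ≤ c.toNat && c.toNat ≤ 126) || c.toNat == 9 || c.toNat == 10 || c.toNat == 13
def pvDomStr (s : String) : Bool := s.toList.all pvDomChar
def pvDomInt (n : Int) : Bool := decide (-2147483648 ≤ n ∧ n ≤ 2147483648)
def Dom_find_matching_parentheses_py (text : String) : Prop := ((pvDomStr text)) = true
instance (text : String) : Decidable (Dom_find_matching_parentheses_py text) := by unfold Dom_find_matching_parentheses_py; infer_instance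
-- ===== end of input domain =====

-- B replaces A's flat matches list + final sort by per-frame accumulation: each open
-- paren carries the list of pairs completed inside it, merged outward on close, so
-- the output is produced already ordered by opening index (objective: alternative).

-- ===== PORT A =====
-- one loop step of A: push '(' index, on ')' pop and record the pair (pop of [] = IndexError, excluded by Pre_)
def pvStepA (st : List Int × List (Int × Int)) (p : Int × Char) : List Int × List (Int × Int) :=
  if p.2 = '(' then (st.1 ++ [p.1], st.2)
  else if p.2 = ')' then
    match PySem.List.pop? st.1 with
    | some r => (r.2, st.2 ++ [(r.1, p.1)])
    | none => st
  else st

def find_matching_parentheses_py (text : String) : List (Int × Int) :=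
  PySem.List.sorted (((PySem.List.enumerate text.toList 0).foldl pvStepA ([], [])).2)
    (fun p => p.1) false

-- ===== PORT B =====
-- one loop step of B: '(' pushes a fresh frame; ')' pops frame (o, kids), builds the
-- block (o,i)::kids and extends the enclosing frame's kids (or the base list) with it.
def pvStepB (st : List (Int × Int) × List (Int × List (Int × Int))) (p : Int × Char) :
    List (Int × Int) × List (Int × List (Int × Int)) :=
  if p.2 = '(' then (st.1, st.2 ++ [(p.1, [])])
  else if p.2 = ')' then
    match PySem.List.pop? st.2 with
    | some r =>
      match r.2.getLast? with
      | some g => (st.1, r.2.dropLast ++ [(g.1, g.2 ++ (r.1.1, p.1) :: r.1.2)])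
      | none => (st.1 ++ (r.1.1, p.1) :: r.1.2, r.2)
    | none => st
  else st

def find_matching_parentheses_py_alt (text : String) : List (Int × Int) :=
  let st := (PySem.List.enumerate text.toList 0).foldl pvStepB ([], [])
  st.1 ++ st.2.flatMap Prod.snd

-- ===== PRECONDITION & SPEC =====
-- Pre_ excludes texts with an unmatched ')' (some prefix has more ')' than '('): there the
-- Python A (and B alike) raises IndexError on stack.pop() from an empty stack.
def Pre_find_matching_parentheses_py (text : String) : Prop :=
  ∀ k : Nat, k ≤ text.toList.length →
    (text.toList.take k).count ')' ≤ (text.toList.take k).count '('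
instance (text : String) : Decidable (Pre_find_matching_parentheses_py text) := by
  unfold Pre_find_matching_parentheses_py; infer_instance
def pvWitness_find_matching_parentheses_py : String := "a(b)(())"

def Spec_find_matching_parentheses_py (text : String) (out : List (Int × Int)) : Prop := out = find_matching_parentheses_py_alt text
instance (text : String) (out : List (Int × Int)) : Decidable (Spec_find_matching_parentheses_py text out) := by unfold Spec_find_matching_parentheses_py; infer_instance

-- ===== CLAIM (what is proved, stated in full; the proofs are below) =====
def Claim_equal_find_matching_parentheses_py : Prop := ∀ (text : String), Dom_find_matching_parentheses_py text → Pre_find_matching_parentheses_py text → Spec_find_matching_parentheses_py text (find_matching_parentheses_py text)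

-- ===== LEMMAS AND PROOFS =====

-- the "skeleton" of a B state: the opening indices it holds, each frame index marking
-- where that frame's (future) pair will sit in the final order
def pvSkel (base : List (Int × Int)) (frames : List (Int × List (Int × Int))) : List Int :=
  base.map Prod.fst ++ frames.flatMap (fun f => f.1 :: f.2.map Prod.fst)

-- the two closing-step shapes of pvStepB
lemma pvStepB_close_nil (base : List (Int × Int)) (f : Int × List (Int × Int)) (i : Int) :
    pvStepB (base, [f]) (i, ')') = (base ++ (f.1, i) :: f.2, []) := by
  simp [pvStepB, show PySem.List.pop? [f] = some (f, []) from PySem.List.pop?_last [] f]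

lemma pvStepB_close_cons (base : List (Int × Int)) (gs : List (Int × List (Int × Int)))
    (g f : Int × List (Int × Int)) (i : Int) :
    pvStepB (base, (gs ++ [g]) ++ [f]) (i, ')')
      = (base, gs ++ [(g.1, g.2 ++ (f.1, i) :: f.2)]) := by
  unfold pvStepB
  rw [PySem.List.pop?_last]
  simp

-- joint loop invariant: B's frame indices are A's stack, B's collected pairs are a
-- permutation of A's matches, and B's skeleton is strictly increasing.
lemma pv_loop (l : List (Int × Char)) :
    ∀ (Ast : List Int) (Ams base : List (Int × Int))
      (frames : List (Int × List (Int × Int))),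
    frames.map Prod.fst = Ast →
    (base ++ frames.flatMap Prod.snd).Perm Ams →
    (pvSkel base frames).Pairwise (· < ·) →
    (∀ p ∈ l, ∀ q ∈ pvSkel base frames, q < p.1) →
    l.Pairwise (fun a b : Int × Char => a.1 < b.1) →
    ((l.foldl pvStepB (base, frames)).1 ++
        (l.foldl pvStepB (base, frames)).2.flatMap Prod.snd).Perm
      (l.foldl pvStepA (Ast, Ams)).2 ∧
    (pvSkel (l.foldl pvStepB (base, frames)).1
        (l.foldl pvStepB (base, frames)).2).Pairwise (· < ·) := by
  induction l with
  | nil => intro Ast Ams base frames _ hperm hpw _ _; exact ⟨hperm, hpw⟩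
  | cons hd tl ih =>
    intro Ast Ams base frames hstk hperm hpw hbnd hl
    obtain ⟨i, c⟩ := hd
    have hl' : tl.Pairwise (fun a b : Int × Char => a.1 < b.1) := (List.pairwise_cons.mp hl).2
    have hi_tl : ∀ p ∈ tl, i < p.1 := fun p hp => (List.pairwise_cons.mp hl).1 p hp
    simp only [List.foldl_cons]
    by_cases hc1 : c = '('
    · -- push
      rw [show pvStepA (Ast, Ams) (i, c) = (Ast ++ [i], Ams) from by simp [pvStepA, hc1],
          show pvStepB (base, frames) (i, c) = (base, frames ++ [(i, [])]) from by
            simp [pvStepB, hc1]]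
      refine ih (Ast ++ [i]) Ams base (frames ++ [(i, [])])
        (by simp [hstk]) (by simpa using hperm) ?_ ?_ hl'
      · have : pvSkel base (frames ++ [(i, [])]) = pvSkel base frames ++ [i] := by
          simp [pvSkel]
        rw [this, List.pairwise_append]
        refine ⟨hpw, List.pairwise_singleton _ _, ?_⟩
        intro a ha b hb
        rw [List.mem_singleton] at hb
        rw [hb]
        exact hbnd (i, c) (List.mem_cons_self ..) a ha
      · intro p hp q hq
        have : pvSkel base (frames ++ [(i, [])]) = pvSkel base frames ++ [i] := by
          simp [pvSkel]
        rw [this] at hq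
        rcases List.mem_append.mp hq with h | h
        · exact hbnd p (List.mem_cons_of_mem _ hp) q h
        · rw [List.mem_singleton] at h; exact h ▸ hi_tl p hp
    · by_cases hc2 : c = ')'
      · subst hc2
        rcases List.eq_nil_or_concat frames with hfr | ⟨fs, f, hfr⟩
        · -- empty stack: Python raises; both ports keep the state
          subst hfr
          have hAst : Ast = [] := by simpa using hstk.symm
          subst hAst
          rw [show pvStepA ([], Ams) (i, ')') = ([], Ams) from by
                simp [pvStepA, PySem.List.pop?],
              show pvStepB (base, ([] : List (Int × List (Int × Int)))) (i, ')') = (base, []) from by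
                simp [pvStepB, PySem.List.pop?]]
          exact ih [] Ams base [] rfl hperm hpw
            (fun p hp => hbnd p (List.mem_cons_of_mem _ hp)) hl'
        · rw [List.concat_eq_append] at hfr
          subst hfr
          have hA : pvStepA (Ast, Ams) (i, ')') = (fs.map Prod.fst, Ams ++ [(f.1, i)]) := by
            have : Ast = fs.map Prod.fst ++ [f.1] := by simpa using hstk.symm
            subst this
            simp [pvStepA, PySem.List.pop?_last]
          rw [hA]
          rcases List.eq_nil_or_concat fs with hfs | ⟨gs, g, hfs⟩
          · -- popped the only frame: block goes to base
            subst hfs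
            simp only [List.nil_append]
            rw [pvStepB_close_nil]
            refine ih [] (Ams ++ [(f.1, i)]) (base ++ (f.1, i) :: f.2) [] rfl ?_ ?_ ?_ hl'
            · have h1 : (base ++ (f.1, i) :: f.2).Perm ((f.1, i) :: (base ++ f.2)) :=
                List.perm_middle
              have hp0 : (base ++ f.2).Perm Ams := by simpa using hperm
              have h2 : ((f.1, i) :: (base ++ f.2)).Perm ((f.1, i) :: Ams) := hp0.cons _
              have h3 : ((f.1, i) :: Ams).Perm (Ams ++ [(f.1, i)]) := by
                simpa using (List.perm_append_comm (l₁ := [(f.1, i)]) (l₂ := Ams))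
              simpa using (h1.trans h2).trans h3
            · have : pvSkel (base ++ (f.1, i) :: f.2) [] = pvSkel base [f] := by
                simp [pvSkel]
              rw [this]; simpa using hpw
            · intro p hp q hq
              have : pvSkel (base ++ (f.1, i) :: f.2) [] = pvSkel base [f] := by
                simp [pvSkel]
              rw [this] at hq
              exact hbnd p (List.mem_cons_of_mem _ hp) q (by simpa using hq)
          · -- block is merged into the enclosing frame g
            rw [List.concat_eq_append] at hfs
            subst hfs
            rw [pvStepB_close_cons]
            have hskel : pvSkel base (gs ++ [(g.1, g.2 ++ (f.1, i) :: f.2)])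
                = pvSkel base ((gs ++ [g]) ++ [f]) := by
              simp [pvSkel]
            refine ih ((gs ++ [g]).map Prod.fst) (Ams ++ [(f.1, i)]) base
              (gs ++ [(g.1, g.2 ++ (f.1, i) :: f.2)]) (by simp) ?_ ?_ ?_ hl'
            · have heq : base ++ (gs ++ [(g.1, g.2 ++ (f.1, i) :: f.2)]).flatMap Prod.snd
                  = (base ++ gs.flatMap Prod.snd ++ g.2) ++ (f.1, i) :: f.2 := by
                simp
              have heq2 : base ++ ((gs ++ [g]) ++ [f]).flatMap Prod.snd
                  = (base ++ gs.flatMap Prod.snd ++ g.2) ++ f.2 := by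
                simp
              rw [heq]
              have h1 : ((base ++ gs.flatMap Prod.snd ++ g.2) ++ (f.1, i) :: f.2).Perm
                  ((f.1, i) :: ((base ++ gs.flatMap Prod.snd ++ g.2) ++ f.2)) :=
                List.perm_middle
              have h2 : ((f.1, i) :: ((base ++ gs.flatMap Prod.snd ++ g.2) ++ f.2)).Perm
                  ((f.1, i) :: Ams) := (heq2 ▸ hperm).cons _
              have h3 : ((f.1, i) :: Ams).Perm (Ams ++ [(f.1, i)]) := by
                simpa using (List.perm_append_comm (l₁ := [(f.1, i)]) (l₂ := Ams))
              exact (h1.trans h2).trans h3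
            · rw [hskel]; exact hpw
            · intro p hp q hq
              rw [hskel] at hq
              exact hbnd p (List.mem_cons_of_mem _ hp) q hq
      · -- other character: both skip
        rw [show pvStepA (Ast, Ams) (i, c) = (Ast, Ams) from by simp [pvStepA, hc1, hc2],
            show pvStepB (base, frames) (i, c) = (base, frames) from by
              simp [pvStepB, hc1, hc2]]
        exact ih Ast Ams base frames hstk hperm hpw
          (fun p hp => hbnd p (List.mem_cons_of_mem _ hp)) hl'

-- the collected pairs' openings form a sublist of the skeleton
lemma pv_res_sublist (base : List (Int × Int)) (frames : List (Int × List (Int × Int))) :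
    ((base ++ frames.flatMap Prod.snd).map Prod.fst).Sublist (pvSkel base frames) := by
  rw [List.map_append, List.map_flatMap]
  refine List.Sublist.append (List.Sublist.refl _) ?_
  induction frames with
  | nil => simp
  | cons f fs ihf =>
    simp only [List.flatMap_cons]
    exact List.Sublist.append (List.sublist_cons_self _ _) ihf

-- ===== VERDICT (by name: the statement is the Claim_ definition above) =====
theorem find_matching_parentheses_py_spec : Claim_equal_find_matching_parentheses_py := by
  intro text _ _
  unfold Spec_find_matching_parentheses_py
  unfold find_matching_parentheses_py find_matching_parentheses_py_alt
  set L := PySem.List.enumerate text.toList 0 with hL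
  have key := pv_loop L [] [] [] []
    rfl (List.Perm.refl _) (by simp [pvSkel])
    (by intro p _ q hq; simp [pvSkel] at hq)
    (hL ▸ PySem.List.pairwise_lt_enumerate text.toList 0)
  obtain ⟨hperm, hpw⟩ := key
  refine PySem.List.sorted_eq_of_perm_of_pairwise_lt _ _ _ hperm ?_
  have hsub := pv_res_sublist (L.foldl pvStepB ([], [])).1 (L.foldl pvStepB ([], [])).2
  have := hpw.sublist hsub
  rw [List.pairwise_map] at this
  exact this
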